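-- pv_equiv track=rewrite | github.com/keanngo/think-like-a-programmer-solutions | ch-6/6-3.py | targetNumberOccurances
-- ===== SOURCE A (Python) =====
-- def targetNumberOccurances(array, target):
--     assert(len(arr) != 0)
--     if len(array) == 1:
--         if array[0] == target:
--             return 1
--         else:
--             return 0
--
--     lastValue = array[len(array) - 1]
--     array.pop()
--     if( lastValue == target):
--         return 1 + targetNumberOccurances(array, target)
--     else:
--         return targetNumberOccurances(array, target)
--
-- arr = [1,2,3,4,5]
-- ===== SOURCE B (Python) =====
-- def targetNumberOccurances(array, target):
--     assert(len(arr) != 0)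
--     count = 0
--     while len(array) > 1:
--         if array.pop() == target:
--             count += 1
--     if array[0] == target:
--         count += 1
--     return count
--
-- arr = [1,2,3,4,5]
-- ===== Notes on version B (the rewrite author's own statement) =====
-- stated objective: simpler
-- what changed: Replaces the tail recursion with an explicit while-loop and a count accumulator, keeping the same back-to-front pop mutation and the vacuous assert on the global arr.
import Mathlib
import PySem

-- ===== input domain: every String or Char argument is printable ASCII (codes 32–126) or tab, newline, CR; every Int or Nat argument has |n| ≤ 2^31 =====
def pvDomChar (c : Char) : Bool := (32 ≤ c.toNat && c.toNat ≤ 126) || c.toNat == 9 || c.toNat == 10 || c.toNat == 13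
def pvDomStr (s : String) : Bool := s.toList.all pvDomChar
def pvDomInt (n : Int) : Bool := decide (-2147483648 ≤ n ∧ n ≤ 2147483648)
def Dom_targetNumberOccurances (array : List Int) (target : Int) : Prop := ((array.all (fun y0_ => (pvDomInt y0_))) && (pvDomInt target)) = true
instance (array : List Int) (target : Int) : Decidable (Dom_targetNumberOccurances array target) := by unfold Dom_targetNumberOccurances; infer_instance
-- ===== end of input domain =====

-- B replaces A's tail recursion with an explicit while-loop and a count accumulator;
-- both mutate the argument down to one element by popping from the back (return-value equivalence is what is proved).

-- ===== PORT A =====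
-- A: recursion popping the last element; on [] Python raises IndexError (excluded by Pre_), port returns 0 there.
def targetNumberOccurances (array : List Int) (target : Int) : Int :=
  match array with
  | [] => 0
  | [x] => if x = target then 1 else 0
  | x :: y :: rest =>
    let a := x :: y :: rest
    let lastValue := a.getLast (by simp)
    if lastValue = target then 1 + targetNumberOccurances a.dropLast target
    else targetNumberOccurances a.dropLast target
termination_by array.length
decreasing_by all_goals simp [List.length_dropLast]

-- ===== PORT B =====
-- B's while-loop: pop from the back while more than one element remains, accumulating count.
def tnoLoop (array : List Int) (target : Int) (count : Int) : Int :=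
  if h : array.length > 1 then
    tnoLoop array.dropLast target
      (if array.getLast (by intro he; simp [he] at h) = target then count + 1 else count)
  else
    match array with
    | [] => count            -- Python: array[0] raises IndexError here (outside Pre_)
    | x :: _ => if x = target then count + 1 else count
termination_by array.length
decreasing_by simp [List.length_dropLast]; omega

def targetNumberOccurances_alt (array : List Int) (target : Int) : Int :=
  tnoLoop array target 0

-- ===== PRECONDITION & SPEC =====
-- Pre_ excludes only the empty list, on which Python A (and B) raise IndexError.
def Pre_targetNumberOccurances (array : List Int) (target : Int) : Prop := array ≠ []
instance (array : List Int) (target : Int) : Decidable (Pre_targetNumberOccurances array target) := by unfold Pre_targetNumberOccurances; infer_instance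
def pvWitness_targetNumberOccurances : List Int × Int := ([1, 2, 2, 3], 2)
def Spec_targetNumberOccurances (array : List Int) (target : Int) (out : Int) : Prop := out = targetNumberOccurances_alt array target
instance (array : List Int) (target : Int) (out : Int) : Decidable (Spec_targetNumberOccurances array target out) := by unfold Spec_targetNumberOccurances; infer_instance

-- ===== CLAIM =====
def Claim_equal_targetNumberOccurances : Prop := ∀ (array : List Int) (target : Int), Dom_targetNumberOccurances array target → Pre_targetNumberOccurances array target → Spec_targetNumberOccurances array target (targetNumberOccurances array target)

-- ===== LEMMAS AND PROOFS =====
theorem tno_loop_eq : ∀ (n : Nat) (array : List Int) (target count : Int),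
    array.length = n → array ≠ [] →
    tnoLoop array target count = count + targetNumberOccurances array target := by
  intro n
  induction n with
  | zero => intro array _ _ hl hne; cases array <;> simp_all
  | succ n ih =>
    intro array target count hl hne
    match array with
    | [x] =>
      rw [tnoLoop, targetNumberOccurances]
      simp only [List.length_cons, List.length_nil]
      split_ifs <;> omega
    | x :: y :: rest =>
      have hlen : (x :: y :: rest).length > 1 := by simp
      rw [tnoLoop, dif_pos hlen, targetNumberOccurances]
      have hdl : (x :: y :: rest).dropLast.length = n := by
        simp [List.length_dropLast] at hl ⊢; omega
      have hdne : (x :: y :: rest).dropLast ≠ [] := by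
        intro he
        rw [he] at hdl
        simp only [List.length_cons] at hl
        simp only [List.length_nil] at hdl
        omega
      rw [ih _ target _ hdl hdne]
      split_ifs <;> ring

theorem targetNumberOccurances_spec : Claim_equal_targetNumberOccurances := by
  intro array target _ hpre
  unfold Spec_targetNumberOccurances targetNumberOccurances_alt
  rw [tno_loop_eq array.length array target 0 rfl hpre]
  ring
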